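-- pv_equiv track=rewrite | github.com/DIASTEMA-UPRC/mathblock-service | mathblock/docker-image/tools.py | not_equal
-- ===== SOURCE A (Python) =====
-- def not_equal(left_data, right_data):
--     results_data = []
--
--     max_len = max(len(left_data), len(right_data))
--     for i in range(max_len):
--         if(i >= len(left_data) or i >= len(right_data)):
--             results_data.append(None)
--             continue
--         if((left_data[i] == "None") or (right_data[i] == "None")):
--             results_data.append(None)
--             continue
--         if((left_data[i] == "") or (right_data[i] == "")):
--             results_data.append(None)
--             continue
--         results_data.append(left_data[i] != right_data[i])
--
--     return results_data
-- ===== SOURCE B (Python) =====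
-- def not_equal(left_data, right_data):
--     n = min(len(left_data), len(right_data))
--     nulls = {i for i, v in enumerate(left_data[:n]) if v == "None" or v == ""}
--     nulls |= {i for i, v in enumerate(right_data[:n]) if v == "None" or v == ""}
--     out = [None if i in nulls else left_data[i] != right_data[i] for i in range(n)]
--     out.extend([None] * (max(len(left_data), len(right_data)) - n))
--     return out
-- ===== Notes on version B (the rewrite author's own statement) =====
-- stated objective: alternative
-- what changed: Instead of one index loop doing bounds and sentinel checks per position, B precomputes a set of null-masked indices by scanning each list separately, then produces the overlap comparisons consulting only that set, and appends the unmatched tail as one bulk [None]*k block.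
import Mathlib
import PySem

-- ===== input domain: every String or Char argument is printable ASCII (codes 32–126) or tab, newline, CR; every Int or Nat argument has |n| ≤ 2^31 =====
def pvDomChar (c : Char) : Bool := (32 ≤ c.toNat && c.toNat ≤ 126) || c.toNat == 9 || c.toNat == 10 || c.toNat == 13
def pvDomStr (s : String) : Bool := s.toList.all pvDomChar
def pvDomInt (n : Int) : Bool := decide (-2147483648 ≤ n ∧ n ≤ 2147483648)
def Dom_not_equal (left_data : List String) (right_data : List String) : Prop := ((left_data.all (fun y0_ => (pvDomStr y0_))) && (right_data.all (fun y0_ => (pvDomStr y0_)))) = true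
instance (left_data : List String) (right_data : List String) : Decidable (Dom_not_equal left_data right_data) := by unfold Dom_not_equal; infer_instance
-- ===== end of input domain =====

-- B precomputes a set of null-masked indices by a separate sentinel scan of each list,
-- builds the overlap comparisons consulting only that set, and appends the tail in bulk;
-- equivalence with A's single checked index loop is proved for all inputs (alternative).


-- ===== PORT A =====
-- for i in range(max_len): bounds check, "None" check, "" check, then left[i] != right[i]
def not_equal (left_data : List String) (right_data : List String) : List (Option Bool) :=
  let max_len : Int := max (left_data.length : Int) (right_data.length : Int)
  (PySem.List.pyRange 0 max_len 1).foldl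
    (fun results_data i =>
      if (left_data.length : Int) ≤ i ∨ (right_data.length : Int) ≤ i then
        results_data ++ [none]
      else if PySem.List.pyGetD left_data i "" = "None" ∨ PySem.List.pyGetD right_data i "" = "None" then
        results_data ++ [none]
      else if PySem.List.pyGetD left_data i "" = "" ∨ PySem.List.pyGetD right_data i "" = "" then
        results_data ++ [none]
      else
        results_data ++ [some (decide (PySem.List.pyGetD left_data i "" ≠ PySem.List.pyGetD right_data i ""))])
    []

-- ===== PORT B =====
-- {i for i, v in enumerate(xs[:n]) if v == "None" or v == ""}  (xs[:n] is passed in already sliced)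
def pvSentinelIdx (xs : List String) : List Int :=
  ((PySem.List.enumerate xs 0).filter (fun p => p.2 == "None" || p.2 == "")).map Prod.fst

-- sentinel-index set over both prefixes, then comparison pass via set membership, then bulk tail
def not_equal_alt (left_data : List String) (right_data : List String) : List (Option Bool) :=
  let n := min left_data.length right_data.length
  let nulls : PySem.Set Int := PySem.Set.ofList (pvSentinelIdx (left_data.take n))
  let nulls := PySem.Set.union nulls (pvSentinelIdx (right_data.take n))
  ((List.range n).map (fun (i : Nat) =>
      if nulls.contains ((i : Nat) : Int) then none
      else some (decide (PySem.List.pyGetD left_data ((i : Nat) : Int) "" ≠ PySem.List.pyGetD right_data ((i : Nat) : Int) ""))))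
  ++ List.replicate (max left_data.length right_data.length - n) (none : Option Bool)

-- ===== PRECONDITION & SPEC =====
def Spec_not_equal (left_data : List String) (right_data : List String) (out : List (Option Bool)) : Prop := out = not_equal_alt left_data right_data
instance (left_data : List String) (right_data : List String) (out : List (Option Bool)) : Decidable (Spec_not_equal left_data right_data out) := by unfold Spec_not_equal; infer_instance

-- ===== CLAIM (what is proved, stated in full; the proofs are below) =====
def Claim_equal_not_equal : Prop := ∀ (left_data : List String) (right_data : List String), Dom_not_equal left_data right_data → Spec_not_equal left_data right_data (not_equal left_data right_data)

-- ===== LEMMAS AND PROOFS =====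

-- the value A's loop body appends at index i
def pvCell (l r : List String) (i : Int) : Option Bool :=
  if (l.length : Int) ≤ i ∨ (r.length : Int) ≤ i then none
  else if PySem.List.pyGetD l i "" = "None" ∨ PySem.List.pyGetD r i "" = "None" then none
  else if PySem.List.pyGetD l i "" = "" ∨ PySem.List.pyGetD r i "" = "" then none
  else some (decide (PySem.List.pyGetD l i "" ≠ PySem.List.pyGetD r i ""))

theorem not_equal_eq_map (l r : List String) :
    not_equal l r = (PySem.List.pyRange 0 (max (l.length : Int) (r.length : Int)) 1).map (pvCell l r) := by
  have hstep : (fun (results_data : List (Option Bool)) (i : Int) =>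
      if (l.length : Int) ≤ i ∨ (r.length : Int) ≤ i then results_data ++ [none]
      else if PySem.List.pyGetD l i "" = "None" ∨ PySem.List.pyGetD r i "" = "None" then results_data ++ [none]
      else if PySem.List.pyGetD l i "" = "" ∨ PySem.List.pyGetD r i "" = "" then results_data ++ [none]
      else results_data ++ [some (decide (PySem.List.pyGetD l i "" ≠ PySem.List.pyGetD r i ""))])
      = (fun results_data i => results_data ++ [pvCell l r i]) := by
    funext acc i
    simp only [pvCell]
    split_ifs <;> rfl
  show (PySem.List.pyRange 0 _ 1).foldl _ [] = _
  rw [hstep, PySem.List.foldl_append_singleton_eq_map]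
  simp

-- membership in the sentinel-index list of a prefix
theorem mem_pvSentinelIdx (xs : List String) (k : Nat) :
    (k : Int) ∈ pvSentinelIdx xs ↔ ∃ h : k < xs.length, (xs[k] = "None" ∨ xs[k] = "") := by
  simp only [pvSentinelIdx, List.mem_map, List.mem_filter, PySem.List.mem_enumerate_iff]
  constructor
  · rintro ⟨p, ⟨⟨j, hj, rfl⟩, hc⟩, hfst⟩
    have : j = k := by simpa using hfst
    subst this
    refine ⟨hj, ?_⟩
    simpa using hc
  · rintro ⟨h, hc⟩
    exact ⟨((0 : Int) + k, xs[k]), ⟨⟨k, h, rfl⟩, by simpa using hc⟩, by simp⟩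

theorem not_equal_spec' (l r : List String) : not_equal l r = not_equal_alt l r := by
  rw [not_equal_eq_map, PySem.List.pyRange_one]
  simp only [not_equal_alt, Int.sub_zero]
  have hmax : ((max (l.length : Int) (r.length : Int))).toNat = max l.length r.length := by omega
  rw [hmax]
  apply List.ext_getElem
  · simp
  · intro k hk1 hk2
    simp only [List.getElem_map, List.getElem_range]
    have hkmax : k < max l.length r.length := by simpa using hk1
    simp only [pvCell]
    by_cases hmin : k < min l.length r.length
    · have hl : k < l.length := by omega
      have hr : k < r.length := by omega
      rw [List.getElem_append_left (by simp; omega)]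
      simp only [List.getElem_map, List.getElem_range]
      have hgl : PySem.List.pyGetD l ((0 : Int) + (k : Int)) "" = l[k] := by
        rw [Int.zero_add, PySem.List.pyGetD_natCast]
        simp [List.getD, List.getElem?_eq_getElem hl]
      have hgr : PySem.List.pyGetD r ((0 : Int) + (k : Int)) "" = r[k] := by
        rw [Int.zero_add, PySem.List.pyGetD_natCast]
        simp [List.getD, List.getElem?_eq_getElem hr]
      have hgl' : PySem.List.pyGetD l ((k : Nat) : Int) "" = l[k] := by simpa using hgl
      have hgr' : PySem.List.pyGetD r ((k : Nat) : Int) "" = r[k] := by simpa using hgr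
      have hnb : ¬ ((l.length : Int) ≤ (0 : Int) + (k : Int) ∨ (r.length : Int) ≤ (0 : Int) + (k : Int)) := by
        push Not; constructor <;> omega
      rw [if_neg hnb]
      have hmem : (PySem.Set.union (PySem.Set.ofList (pvSentinelIdx (l.take (min l.length r.length)))) (pvSentinelIdx (r.take (min l.length r.length)))).contains (k : Int)
          = true ↔ ((l[k] = "None" ∨ l[k] = "") ∨ (r[k] = "None" ∨ r[k] = "")) := by
        rw [PySem.Set.contains_iff, PySem.Set.mem_union]
        rw [PySem.Set.mem_ofList, mem_pvSentinelIdx, mem_pvSentinelIdx]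
        constructor
        · rintro (⟨h, hc⟩ | ⟨h, hc⟩)
          · exact Or.inl (by simpa [List.getElem_take] using hc)
          · exact Or.inr (by simpa [List.getElem_take] using hc)
        · rintro (hc | hc)
          · exact Or.inl ⟨by simp; omega, by simpa [List.getElem_take] using hc⟩
          · exact Or.inr ⟨by simp; omega, by simpa [List.getElem_take] using hc⟩
      by_cases hs : (l[k] = "None" ∨ l[k] = "") ∨ (r[k] = "None" ∨ r[k] = "")
      · rw [if_pos (hmem.mpr hs)]
        rw [hgl, hgr]
        split_ifs <;> first | rfl | tauto
      · have hcontains : ¬ (PySem.Set.union (PySem.Set.ofList (pvSentinelIdx (l.take (min l.length r.length)))) (pvSentinelIdx (r.take (min l.length r.length)))).contains (k : Int) = true := by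
          intro h; exact hs (hmem.mp h)
        rw [if_neg hcontains]
        push Not at hs
        rw [hgl, hgr]
        rw [if_neg (by tauto), if_neg (by tauto)]
        simp [hgl', hgr']  -- l[k] != r[k]
    · have hb : (l.length : Int) ≤ (0 : Int) + (k : Int) ∨ (r.length : Int) ≤ (0 : Int) + (k : Int) := by
        omega
      rw [if_pos hb, List.getElem_append_right (by simp; omega)]
      simp

-- ===== VERDICT (by name: the statement is the Claim_ definition above) =====
theorem not_equal_spec : Claim_equal_not_equal := by
  intro l r _
  exact not_equal_spec' l r
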